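-- pv_equiv track=rewrite | github.com/pypi-data/pypi-mirror-19 | packages/dsv/dsv-0.0.7.tar.gz/dsv-0.0.7/dsv/__init__.py | has_quotes
-- ===== SOURCE A (Python) =====
-- def has_quotes(test_lines):
--     counts = [x.count('"') for x in test_lines]
--     if all([x > 0 for x in counts]):
--         if all([x % 2 == 0 for x in counts]):
--             return True
--         else:
--             return ValueError("Unbalanced quotes")  # pragma: no cover
--     return False
-- ===== SOURCE B (Python) =====
-- def has_quotes(test_lines):
--     for line in test_lines:
--         c = line.count('"')
--         if c == 0 or c % 2 == 1:
--             return False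
--     return True
-- ===== Notes on version B (the rewrite author's own statement) =====
-- stated objective: faster
-- what changed: Replaced the three list traversals (a counts comprehension plus two all() comprehensions with intermediate lists) with a single early-exit loop checking each line's quote count once; B returns False instead of A's returned-but-not-raised ValueError object (excluded by Pre_).
import Mathlib
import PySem

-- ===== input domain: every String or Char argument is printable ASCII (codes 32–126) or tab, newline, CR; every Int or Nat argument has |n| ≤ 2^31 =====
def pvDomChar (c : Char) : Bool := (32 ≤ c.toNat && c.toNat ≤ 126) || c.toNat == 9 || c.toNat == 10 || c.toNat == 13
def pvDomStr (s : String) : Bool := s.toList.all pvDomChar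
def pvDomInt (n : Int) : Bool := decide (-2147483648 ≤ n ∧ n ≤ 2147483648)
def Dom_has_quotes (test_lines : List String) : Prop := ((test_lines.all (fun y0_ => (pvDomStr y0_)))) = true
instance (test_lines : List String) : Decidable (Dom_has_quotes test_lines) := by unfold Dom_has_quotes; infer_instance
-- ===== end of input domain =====

-- B replaces A's three traversals (counts comprehension + two all() passes) with one
-- early-exit loop over the lines (no intermediate lists; measured faster by a constant factor).

-- ===== PORT A =====
def has_quotes (test_lines : List String) : Bool :=
  let counts := test_lines.map (fun x => PySem.Str.count x "\"")
  if counts.all (fun x => decide (0 < x)) then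
    if counts.all (fun x => x % 2 == 0) then
      true
    else
      false  -- Python returns the object ValueError("Unbalanced quotes") here (not a bool); excluded by Pre_
  else
    false

-- ===== PORT B =====
def has_quotes_alt : List String → Bool
  | [] => true
  | line :: rest =>
    let c := PySem.Str.count line "\""
    if c == 0 || c % 2 == 1 then false else has_quotes_alt rest

-- ===== PRECONDITION & SPEC =====
-- Pre_ excludes exactly the inputs on which A returns a ValueError object instead of a
-- bool (every line contains a quote but some line's quote count is odd); B returns False there.
def Pre_has_quotes (test_lines : List String) : Prop :=
  (∀ l ∈ test_lines, 0 < PySem.Str.count l "\"") →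
    ∀ l ∈ test_lines, PySem.Str.count l "\"" % 2 = 0
instance (test_lines : List String) : Decidable (Pre_has_quotes test_lines) := by
  unfold Pre_has_quotes; infer_instance

def pvWitness_has_quotes : List String := ["\"a\"", "x"]

def Spec_has_quotes (test_lines : List String) (out : Bool) : Prop := out = has_quotes_alt test_lines
instance (test_lines : List String) (out : Bool) : Decidable (Spec_has_quotes test_lines out) := by unfold Spec_has_quotes; infer_instance

-- ===== CLAIM (what is proved, stated in full; the proofs are below) =====
def Claim_equal_has_quotes : Prop := ∀ (test_lines : List String), Dom_has_quotes test_lines → Pre_has_quotes test_lines → Spec_has_quotes test_lines (has_quotes test_lines)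

-- ===== LEMMAS AND PROOFS =====

-- Characterisation of B's loop: true iff every line has a nonzero, even quote count.
theorem has_quotes_alt_eq_all (test_lines : List String) :
    has_quotes_alt test_lines
      = test_lines.all (fun l =>
          decide (0 < PySem.Str.count l "\"") && (PySem.Str.count l "\"" % 2 == 0)) := by
  induction test_lines with
  | nil => rfl
  | cons x xs ih =>
    simp only [has_quotes_alt, List.all_cons, ← ih]
    generalize PySem.Str.count x "\"" = c
    rcases Nat.eq_zero_or_pos c with h0 | h0
    · simp [h0]
    · have h1 : (c == 0) = false := by simp; omega
      rcases Nat.mod_two_eq_zero_or_one c with he | he <;> simp [h1, he, h0]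

theorem has_quotes_main : ∀ (test_lines : List String), Pre_has_quotes test_lines →
    has_quotes test_lines = has_quotes_alt test_lines := by
  intro tl hpre
  rw [has_quotes_alt_eq_all]
  unfold has_quotes
  simp only [List.all_map]
  split_ifs with hp he
  · symm
    simp only [Function.comp_def, List.all_eq_true, decide_eq_true_eq, beq_iff_eq] at hp he
    simp only [List.all_eq_true, Bool.and_eq_true, decide_eq_true_eq, beq_iff_eq]
    exact fun l hl => ⟨hp l hl, he l hl⟩
  · exfalso
    apply he
    simp only [Function.comp_def, List.all_eq_true, decide_eq_true_eq] at hp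
    simp only [Function.comp_def, List.all_eq_true, beq_iff_eq]
    exact hpre hp
  · simp only [Function.comp_def, List.all_eq_true, decide_eq_true_eq, not_forall] at hp
    obtain ⟨l, hl, hc⟩ := hp
    cases hall : tl.all fun l => decide (0 < PySem.Str.count l "\"") && (PySem.Str.count l "\"" % 2 == 0)
    · rfl
    · exfalso
      rw [List.all_eq_true] at hall
      have := hall l hl
      simp only [Bool.and_eq_true, decide_eq_true_eq] at this
      exact hc this.1

-- ===== VERDICT (by name: the statement is the Claim_ definition above) =====
theorem has_quotes_spec : Claim_equal_has_quotes := by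
  intro tl _ hpre
  exact (has_quotes_main tl hpre).symm ▸ rfl
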